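-- pv_equiv track=rewrite | github.com/RolandCSCHC/ATML-final-project | chatbot.py | adjust_response_length
-- ===== SOURCE A (Python) =====
-- def adjust_response_length(response_text):
--     """
--     Adjusts the response length to end at a natural stopping point.
--     """
--     # Find the last natural end point
--     end_markers = [". ", "! ", "? "]
--     last_end_position = -1
--
--     for marker in end_markers:
--         pos = response_text.rfind(marker)
--         last_end_position = max(last_end_position, pos)
--
--     if last_end_position != -1:
--         return response_text[: last_end_position + 1].strip()
--     return response_text.strip()
-- ===== SOURCE B (Python) =====
-- def adjust_response_length(response_text):
--     last = -1
--     for i in range(len(response_text) - 1):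
--         if response_text[i] in ".!?" and response_text[i + 1] == " ":
--             last = i
--     if last != -1:
--         return response_text[: last + 1].strip()
--     return response_text.strip()
-- ===== Notes on version B (the rewrite author's own statement) =====
-- stated objective: alternative
-- what changed: Replaces three rfind substring searches plus a running max with one left-to-right index scan that keeps the last position where a sentence-ending character is followed by a space.
import Mathlib
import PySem

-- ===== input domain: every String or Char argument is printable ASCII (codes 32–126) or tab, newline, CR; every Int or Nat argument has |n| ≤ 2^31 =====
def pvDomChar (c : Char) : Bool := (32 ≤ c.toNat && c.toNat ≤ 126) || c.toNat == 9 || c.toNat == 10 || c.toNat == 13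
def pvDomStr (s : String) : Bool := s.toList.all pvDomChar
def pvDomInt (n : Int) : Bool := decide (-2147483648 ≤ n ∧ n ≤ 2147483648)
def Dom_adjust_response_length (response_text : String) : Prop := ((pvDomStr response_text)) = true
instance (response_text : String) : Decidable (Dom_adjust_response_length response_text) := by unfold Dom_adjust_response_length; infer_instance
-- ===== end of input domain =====

-- B replaces A's three rfind substring searches + running max by one forward index scan; same return value (alternative decomposition, no speed claim).

-- ===== PORT A =====
def adjust_response_length (response_text : String) : String :=
  let end_markers : List String := [". ", "! ", "? "]
  let last_end_position : Int :=
    end_markers.foldl (fun last marker => max last (PySem.Str.rfind response_text marker)) (-1)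
  if last_end_position ≠ -1 then
    PySem.Str.strip (PySem.Str.slice response_text none (some (last_end_position + 1)))
  else
    PySem.Str.strip response_text

-- ===== PORT B =====
-- the loop indices satisfy i+1 < len, so List.getD is exact for Python's s[i] here
def adjust_response_length_alt (response_text : String) : String :=
  let cs := response_text.toList
  let last : Int :=
    (List.range (cs.length - 1)).foldl
      (fun last i =>
        if ((cs.getD i ' ' == '.') || (cs.getD i ' ' == '!') || (cs.getD i ' ' == '?'))
            && (cs.getD (i + 1) ' ' == ' ') then (i : Int) else last)
      (-1)
  if last ≠ -1 then
    PySem.Str.strip (PySem.Str.slice response_text none (some (last + 1)))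
  else
    PySem.Str.strip response_text

-- ===== PRECONDITION & SPEC =====
def Spec_adjust_response_length (response_text : String) (out : String) : Prop := out = adjust_response_length_alt response_text
instance (response_text : String) (out : String) : Decidable (Spec_adjust_response_length response_text out) := by unfold Spec_adjust_response_length; infer_instance

-- ===== CLAIM (what is proved, stated in full; the proofs are below) =====
def Claim_equal_adjust_response_length : Prop := ∀ (response_text : String), Dom_adjust_response_length response_text → Spec_adjust_response_length response_text (adjust_response_length response_text)

-- ===== LEMMAS AND PROOFS =====

-- greatest i < n with P i, as an Int, else -1
def mhit (P : Nat → Bool) : Nat → Int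
  | 0 => -1
  | k + 1 => if P k then (k : Int) else mhit P k

theorem neg_one_le_mhit (P : Nat → Bool) : ∀ n, -1 ≤ mhit P n
  | 0 => le_refl _
  | k + 1 => by
      simp only [mhit]
      split
      · have := Int.natCast_nonneg k; omega
      · exact neg_one_le_mhit P k

theorem mhit_le (P : Nat → Bool) : ∀ n, mhit P n ≤ (n : Int) - 1
  | 0 => le_refl _
  | k + 1 => by
      simp only [mhit]
      split
      · push_cast; omega
      · have := mhit_le P k; push_cast; push_cast at this; omega

theorem max_mhit (P Q : Nat → Bool) : ∀ n, max (mhit P n) (mhit Q n) = mhit (fun i => P i || Q i) n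
  | 0 => by simp [mhit]
  | k + 1 => by
      have hP := mhit_le P k
      have hQ := mhit_le Q k
      have hk : (0 : Int) ≤ (k : Int) := Int.natCast_nonneg k
      simp only [mhit]
      by_cases hp : P k = true <;> by_cases hq : Q k = true
      · simp [hp, hq]
      · have hq' : Q k = false := by simpa using hq
        simp only [hp, hq', Bool.true_or, if_true]
        exact max_eq_left (by omega)
      · have hp' : P k = false := by simpa using hp
        simp only [hp', hq, Bool.false_or, if_true]
        exact max_eq_right (by omega)
      · have hp' : P k = false := by simpa using hp
        have hq' : Q k = false := by simpa using hq
        simp only [hp', hq', Bool.false_or]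
        exact max_mhit P Q k

theorem mhit_congr (P Q : Nat → Bool) : ∀ n, (∀ i, i < n → P i = Q i) → mhit P n = mhit Q n
  | 0, _ => rfl
  | k + 1, h => by
      simp only [mhit, h k (by omega)]
      rw [mhit_congr P Q k (fun i hi => h i (by omega))]

theorem mhit_top_false (P : Nat → Bool) (k : Nat) (h : P k = false) : mhit P (k + 1) = mhit P k := by
  simp [mhit, h]

theorem foldl_range_mhit (Q : Nat → Bool) :
    ∀ n, (List.range n).foldl (fun last i => if Q i then (i : Int) else last) (-1) = mhit Q n
  | 0 => rfl
  | n + 1 => by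
      rw [List.range_succ, List.foldl_append, foldl_range_mhit Q n]
      simp only [List.foldl, mhit]

theorem go_eq_mhit (s m : List Char) :
    ∀ k, PySem.Chars.rfind.go s m k = mhit (fun i => m.isPrefixOf (List.drop i s)) (k + 1)
  | 0 => by simp [PySem.Chars.rfind.go, mhit]
  | k + 1 => by
      simp only [PySem.Chars.rfind.go, mhit]
      rw [go_eq_mhit s m k]
      simp [mhit]

theorem isPrefixOf_pair (c d : Char) (l : List Char) :
    [c, d].isPrefixOf l = ((l[0]? == some c) && (l[1]? == some d)) := by
  match l with
  | [] => simp [List.isPrefixOf]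
  | [x] => simp [List.isPrefixOf]
  | x :: y :: t => simp [List.isPrefixOf, BEq.comm]


theorem por_false (cs : List Char) (i : Nat) (h : cs.length ≤ i + 1) :
    (([('.' : Char), ' '].isPrefixOf (List.drop i cs) || ['!', ' '].isPrefixOf (List.drop i cs)) ||
      ['?', ' '].isPrefixOf (List.drop i cs)) = false := by
  have h1 : (List.drop i cs)[1]? = none := by
    rw [List.getElem?_drop]
    exact List.getElem?_eq_none (by omega)
  simp [isPrefixOf_pair, h1]

theorem por_eq_q (cs : List Char) (i : Nat) (h : i + 1 < cs.length) :
    ((['.', ' '].isPrefixOf (List.drop i cs) || ['!', ' '].isPrefixOf (List.drop i cs)) ||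
      ['?', ' '].isPrefixOf (List.drop i cs))
    = (((cs.getD i ' ' == '.') || (cs.getD i ' ' == '!') || (cs.getD i ' ' == '?'))
        && (cs.getD (i + 1) ' ' == ' ')) := by
  have hi : i < cs.length := by omega
  have h0 : (List.drop i cs)[0]? = some cs[i] := by
    rw [List.getElem?_drop]; simp [List.getElem?_eq_getElem hi]
  have h1 : (List.drop i cs)[1]? = some cs[i + 1] := by
    rw [List.getElem?_drop]; simp [List.getElem?_eq_getElem h]
  have g0 : cs.getD i ' ' = cs[i] := List.getD_eq_getElem cs ' ' hi
  have g1 : cs.getD (i + 1) ' ' = cs[i + 1] := List.getD_eq_getElem cs ' ' h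
  simp only [isPrefixOf_pair, h0, h1, g0, g1]
  cases hd : (cs[i + 1] == ' ') <;>
    cases ha : (cs[i] == '.') <;> cases hb : (cs[i] == '!') <;> cases hc : (cs[i] == '?') <;>
      simp_all

theorem main_mhit (cs : List Char) :
    mhit (fun i => (['.', ' '].isPrefixOf (List.drop i cs) || ['!', ' '].isPrefixOf (List.drop i cs)) ||
      ['?', ' '].isPrefixOf (List.drop i cs)) (cs.length + 1)
    = mhit (fun i => ((cs.getD i ' ' == '.') || (cs.getD i ' ' == '!') || (cs.getD i ' ' == '?'))
        && (cs.getD (i + 1) ' ' == ' ')) (cs.length - 1) := by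
  rcases hn : cs.length with _ | m
  · rw [mhit_top_false _ 0 (por_false cs 0 (by omega))]
    rfl
  · rw [mhit_top_false _ (m + 1) (por_false cs (m + 1) (by omega)),
        mhit_top_false _ m (por_false cs m (by omega)), Nat.add_sub_cancel]
    exact mhit_congr _ _ m (fun i hi => por_eq_q cs i (by omega))

-- ===== VERDICT (by name: the statement is the Claim_ definition above) =====
theorem adjust_response_length_spec : Claim_equal_adjust_response_length := by
  intro s _
  unfold Spec_adjust_response_length adjust_response_length adjust_response_length_alt
  simp only [List.foldl, PySem.Str.rfind_eq, PySem.Chars.rfind]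
  rw [show (". " : String).toList = ['.', ' '] from rfl,
      show ("! " : String).toList = ['!', ' '] from rfl,
      show ("? " : String).toList = ['?', ' '] from rfl]
  rw [go_eq_mhit, go_eq_mhit, go_eq_mhit]
  rw [max_eq_right (neg_one_le_mhit _ _), max_mhit, max_mhit]
  rw [foldl_range_mhit, main_mhit]
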